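-- pv_equiv track=rewrite | github.com/ReclaimLLM/RCLM | rclm/compress/filters/git.py | _filter_log
-- ===== SOURCE A (Python) =====
-- def _filter_log(output: str) -> str:
--     """Condense git log to one-line-per-commit, max 20."""
--     if not output.strip():
--         return "no commits"
--
--     lines = output.splitlines()
--     commits: list[str] = []
--     current_hash = ""
--     current_msg = ""
--
--     for line in lines:
--         if line.startswith("commit "):
--             if current_hash:
--                 commits.append(f"{current_hash[:7]} {current_msg.strip()}")
--             current_hash = line[7:].strip()
--             current_msg = ""
--         elif line.startswith("    "):
--             if not current_msg:
--                 current_msg = line.strip()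
--
--     if current_hash:
--         commits.append(f"{current_hash[:7]} {current_msg.strip()}")
--
--     # If output already looks one-line-per-commit, just truncate
--     if not commits:
--         commits = [line.strip() for line in lines if line.strip()]
--
--     if len(commits) > 20:
--         commits = commits[:20]
--         commits.append(f"... ({len(lines)} total lines truncated)")
--
--     return "\n".join(commits)
-- ===== SOURCE B (Python) =====
-- def _filter_log(output: str) -> str:
--     """Condense git log to one-line-per-commit, max 20."""
--     if not output.strip():
--         return "no commits"
--
--     lines = output.splitlines()
--
--     # pass 1: segment into commit blocks (header line + its following body lines)
--     blocks = []
--     i = 0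
--     while i < len(lines):
--         if lines[i].startswith("commit "):
--             j = i + 1
--             while j < len(lines) and not lines[j].startswith("commit "):
--                 j += 1
--             blocks.append((lines[i], lines[i + 1:j]))
--             i = j
--         else:
--             i += 1
--
--     # pass 2: one condensed line per block
--     commits = []
--     for header, body in blocks:
--         h = header[7:].strip()
--         if not h:
--             continue
--         msg = next((l.strip() for l in body if l.startswith("    ") and l.strip()), "")
--         commits.append(f"{h[:7]} {msg}")
--
--     # If output already looks one-line-per-commit, just truncate
--     if not commits:
--         commits = [line.strip() for line in lines if line.strip()]
--
--     if len(commits) > 20: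
--         commits = commits[:20]
--         commits.append(f"... ({len(lines)} total lines truncated)")
--
--     return "\n".join(commits)
-- ===== Notes on version B (the rewrite author's own statement) =====
-- stated objective: alternative
-- what changed: Replaced A's single-pass state machine (current_hash/current_msg mutated per line) by two separate passes: first segment the lines into commit blocks (header + body), then map each block to its condensed line; guard, fallback and truncation kept identical.
import Mathlib
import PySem

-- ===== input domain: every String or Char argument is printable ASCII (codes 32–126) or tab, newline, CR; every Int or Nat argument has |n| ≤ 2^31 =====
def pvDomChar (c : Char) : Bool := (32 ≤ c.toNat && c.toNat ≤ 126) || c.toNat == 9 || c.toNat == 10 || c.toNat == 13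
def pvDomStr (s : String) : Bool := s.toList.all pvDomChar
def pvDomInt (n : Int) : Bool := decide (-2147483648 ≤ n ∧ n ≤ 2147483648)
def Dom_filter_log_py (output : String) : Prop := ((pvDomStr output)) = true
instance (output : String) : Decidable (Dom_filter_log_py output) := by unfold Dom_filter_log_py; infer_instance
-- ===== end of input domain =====

-- B replaces A's single-pass three-variable state machine by two passes (segment into
-- commit blocks, then map each block to its condensed line); same return value (alternative decomposition).

-- ===== PORT A =====
-- state: (commits, current_hash, current_msg)
def pvStepA (s : List String × String × String) (line : String) : List String × String × String :=
  if PySem.Str.startswith line "commit " then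
    ((if s.2.1 ≠ "" then
        s.1 ++ [PySem.Str.slice s.2.1 none (some 7) ++ " " ++ PySem.Str.strip s.2.2]
      else s.1),
     PySem.Str.strip (PySem.Str.slice line (some 7) none), "")
  else if PySem.Str.startswith line "    " then
    (s.1, s.2.1, if s.2.2 = "" then PySem.Str.strip line else s.2.2)
  else s

def filter_log_py (output : String) : String :=
  if PySem.Str.strip output = "" then "no commits"
  else
    let lines := PySem.Str.splitlines output
    let st := lines.foldl pvStepA ([], "", "")
    let commits :=
      if st.2.1 ≠ "" then
        st.1 ++ [PySem.Str.slice st.2.1 none (some 7) ++ " " ++ PySem.Str.strip st.2.2]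
      else st.1
    let commits := if commits = [] then (lines.map PySem.Str.strip).filter (fun l => l != "") else commits
    let commits :=
      if 20 < commits.length then
        PySem.List.slice commits none (some 20) ++
          ["... (" ++ PySem.Int.toStr (lines.length : Int) ++ " total lines truncated)"]
      else commits
    PySem.Str.join "\n" commits

-- ===== PORT B =====
def pvIsHeader (line : String) : Bool := PySem.Str.startswith line "commit "

-- pass 1 of Source B: segment the lines into (header, body) blocks
def pvBlocks : List String → List (String × List String)
  | [] => []
  | l :: ls =>
    if pvIsHeader l then
      (l, ls.takeWhile (fun x => !pvIsHeader x)) :: pvBlocks (ls.dropWhile (fun x => !pvIsHeader x))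
    else pvBlocks ls
termination_by ls => ls.length
decreasing_by
  · exact Nat.lt_succ_of_le (List.length_dropWhile_le _ _)
  · simp

-- next((l.strip() for l in body if l.startswith("    ") and l.strip()), "")
def pvBlockMsg (body : List String) : String :=
  match body.find? (fun x => PySem.Str.startswith x "    " && PySem.Str.strip x != "") with
  | some l => PySem.Str.strip l
  | none => ""

-- pass 2 of Source B: one condensed line per block (none = the 'continue' on an empty hash)
def pvBlockCommit (b : String × List String) : Option String :=
  let h := PySem.Str.strip (PySem.Str.slice b.1 (some 7) none)
  if h = "" then none
  else some (PySem.Str.slice h none (some 7) ++ " " ++ pvBlockMsg b.2)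

def filter_log_py_alt (output : String) : String :=
  if PySem.Str.strip output = "" then "no commits"
  else
    let lines := PySem.Str.splitlines output
    let commits := (pvBlocks lines).filterMap pvBlockCommit
    let commits := if commits = [] then (lines.map PySem.Str.strip).filter (fun l => l != "") else commits
    let commits :=
      if 20 < commits.length then
        PySem.List.slice commits none (some 20) ++
          ["... (" ++ PySem.Int.toStr (lines.length : Int) ++ " total lines truncated)"]
      else commits
    PySem.Str.join "\n" commits

-- ===== PRECONDITION & SPEC =====
def Spec_filter_log_py (output : String) (out : String) : Prop := out = filter_log_py_alt output
instance (output : String) (out : String) : Decidable (Spec_filter_log_py output out) := by unfold Spec_filter_log_py; infer_instance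

-- ===== CLAIM (what is proved, stated in full; the proofs are below) =====
def Claim_equal_filter_log_py : Prop := ∀ (output : String), Dom_filter_log_py output → Spec_filter_log_py output (filter_log_py output)

-- ===== LEMMAS AND PROOFS =====

lemma pv_dropWhile_idem {α : Type} (p : α → Bool) (l : List α) :
    (l.dropWhile p).dropWhile p = l.dropWhile p := by
  induction l with
  | nil => simp
  | cons a t ih =>
    by_cases h : p a
    · simp [h, ih]
    · simp [h]

lemma pv_dropWhile_of_prefix {α : Type} (p : α → Bool) {v u : List α}
    (hv : v <+: u) (hu : u.dropWhile p = u) : v.dropWhile p = v := by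
  obtain ⟨t, rfl⟩ := hv
  cases v with
  | nil => simp
  | cons a vs =>
    by_cases h : p a
    · exfalso
      have h1 := congrArg List.length hu
      have h2 := List.length_dropWhile_le p (vs ++ t)
      simp [h, List.length_append] at h1 h2
      omega
    · simp [h]

lemma pv_strip_idem_chars (l : List Char) :
    PySem.Chars.strip (PySem.Chars.strip l) = PySem.Chars.strip l := by
  have hu : (l.dropWhile PySem.Chars.isspace).dropWhile PySem.Chars.isspace
      = l.dropWhile PySem.Chars.isspace := pv_dropWhile_idem _ _
  set u := l.dropWhile PySem.Chars.isspace with hudef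
  have hpref : (u.reverse.dropWhile PySem.Chars.isspace).reverse <+: u := by
    have hsuf : u.reverse.dropWhile PySem.Chars.isspace <:+ u.reverse := List.dropWhile_suffix _
    have := List.reverse_prefix.mpr hsuf
    simpa using this
  have hl : ((u.reverse.dropWhile PySem.Chars.isspace).reverse).dropWhile PySem.Chars.isspace
      = (u.reverse.dropWhile PySem.Chars.isspace).reverse :=
    pv_dropWhile_of_prefix _ hpref hu
  simp [PySem.Chars.strip, PySem.Chars.lstrip, PySem.Chars.rstrip, hudef.symm, hl,
    pv_dropWhile_idem]

lemma pv_strip_idem (s : String) : PySem.Str.strip (PySem.Str.strip s) = PySem.Str.strip s := by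
  simp [PySem.Str.strip, pv_strip_idem_chars]

lemma pv_blockMsg_strip (body : List String) :
    PySem.Str.strip (pvBlockMsg body) = pvBlockMsg body := by
  unfold pvBlockMsg
  cases h : body.find? (fun x => PySem.Str.startswith x "    " && PySem.Str.strip x != "") with
  | none => decide
  | some l => exact pv_strip_idem l

lemma pv_blocks_skip (ls : List String) :
    pvBlocks (ls.dropWhile (fun x => !pvIsHeader x)) = pvBlocks ls := by
  induction ls with
  | nil => simp
  | cons a t ih =>
    by_cases h : pvIsHeader a
    · simp [h]
    · simp only [List.dropWhile_cons, h]
      simpa [pvBlocks, h] using ih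

lemma pv_strip_empty : PySem.Str.strip "" = "" := by decide

lemma pvBlocks_cons_header (l : String) (ls : List String) (hl : pvIsHeader l = true) :
    pvBlocks (l :: ls)
      = (l, ls.takeWhile (fun x => !pvIsHeader x))
          :: pvBlocks (ls.dropWhile (fun x => !pvIsHeader x)) := by
  simp [pvBlocks, hl]

lemma pvBlocks_cons_nonheader (l : String) (ls : List String) (hl : pvIsHeader l = false) :
    pvBlocks (l :: ls) = pvBlocks ls := by
  simp [pvBlocks, hl]

lemma pvBlockMsg_nil : pvBlockMsg [] = "" := rfl

lemma pvBlockMsg_cons_skip (l : String) (body : List String)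
    (h : (PySem.Str.startswith l "    " && PySem.Str.strip l != "") = false) :
    pvBlockMsg (l :: body) = pvBlockMsg body := by
  simp only [pvBlockMsg, List.find?_cons, h]

lemma pvBlockMsg_cons_hit (l : String) (body : List String)
    (h : (PySem.Str.startswith l "    " && PySem.Str.strip l != "") = true) :
    pvBlockMsg (l :: body) = PySem.Str.strip l := by
  simp only [pvBlockMsg, List.find?_cons, h]

-- A's loop, expressed block-wise; h/m are the pending state.
lemma pv_main (lines : List String) : ∀ (cs : List String) (h m : String),
    (let st := lines.foldl pvStepA (cs, h, m);
     if st.2.1 ≠ "" then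
       st.1 ++ [PySem.Str.slice st.2.1 none (some 7) ++ " " ++ PySem.Str.strip st.2.2]
     else st.1)
    = cs ++ (if h = "" then (pvBlocks lines).filterMap pvBlockCommit
        else (if m = "" then
                [PySem.Str.slice h none (some 7) ++ " " ++
                  PySem.Str.strip (pvBlockMsg (lines.takeWhile (fun x => !pvIsHeader x)))]
              else [PySem.Str.slice h none (some 7) ++ " " ++ PySem.Str.strip m])
          ++ (pvBlocks (lines.dropWhile (fun x => !pvIsHeader x))).filterMap pvBlockCommit) := by
  induction lines with
  | nil =>
    intro cs h m
    by_cases hh : h = ""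
    · simp [hh, pvBlocks]
    · by_cases hm : m = "" <;>
        simp [hh, hm, pvBlocks, pvBlockMsg_nil, pv_strip_empty]
  | cons l ls ih =>
    intro cs h m
    simp only [List.foldl_cons]
    by_cases hl : pvIsHeader l
    · -- header line
      have htw : List.takeWhile (fun x => !pvIsHeader x) (l :: ls) = ([] : List String) := by
        simp [hl]
      have hdw : List.dropWhile (fun x => !pvIsHeader x) (l :: ls) = l :: ls := by
        simp [hl]
      rw [show pvStepA (cs, h, m) l
            = ((if h ≠ "" then
                  cs ++ [PySem.Str.slice h none (some 7) ++ " " ++ PySem.Str.strip m]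
                else cs),
               PySem.Str.strip (PySem.Str.slice l (some 7) none), "") from by
            have hl' := hl; simp [pvIsHeader] at hl'; simp [pvStepA, hl']]
      rw [ih]
      rw [htw, hdw, pvBlocks_cons_header _ _ hl, List.filterMap_cons]
      by_cases hh' : PySem.Str.strip (PySem.Str.slice l (some 7) none) = ""
      · rw [show pvBlockCommit (l, List.takeWhile (fun x => !pvIsHeader x) ls) = none from by
              simp [pvBlockCommit, hh']]
        by_cases hh : h = "" <;> by_cases hm : m = "" <;>
          simp [hh, hm, hh', pvBlockMsg_nil, pv_strip_empty, pv_blocks_skip]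
      · rw [show pvBlockCommit (l, List.takeWhile (fun x => !pvIsHeader x) ls)
              = some (PySem.Str.slice (PySem.Str.strip (PySem.Str.slice l (some 7) none)) none (some 7)
                  ++ " " ++ pvBlockMsg (List.takeWhile (fun x => !pvIsHeader x) ls)) from by
              simp [pvBlockCommit, hh']]
        by_cases hh : h = "" <;> by_cases hm : m = "" <;>
          simp [hh, hm, hh', pvBlockMsg_nil, pv_strip_empty, pv_blockMsg_strip]
    · -- not a header line
      have hlf : pvIsHeader l = false := by simpa using hl
      have htw : List.takeWhile (fun x => !pvIsHeader x) (l :: ls)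
          = l :: List.takeWhile (fun x => !pvIsHeader x) ls := by
        simp [hlf]
      have hdw : List.dropWhile (fun x => !pvIsHeader x) (l :: ls)
          = List.dropWhile (fun x => !pvIsHeader x) ls := by
        simp [hlf]
      rw [htw, hdw, pvBlocks_cons_nonheader _ _ hlf]
      by_cases hi : PySem.Str.startswith l "    " = true
      · rw [show pvStepA (cs, h, m) l
              = (cs, h, if m = "" then PySem.Str.strip l else m) from by
              have hl' := hlf; simp [pvIsHeader] at hl'
              have hi' := hi; simp at hi'
              simp [pvStepA, hl', hi']]
        by_cases hh : h = ""
        · rw [ih]; simp [hh]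
        · by_cases hm : m = ""
          · by_cases hsl : PySem.Str.strip l = ""
            · rw [ih]
              simp [hh, hm, hsl, pvBlockMsg_cons_skip l _ (by simp [hsl])]
            · rw [ih]
              simp [hh, hm, hsl, pvBlockMsg_cons_hit l _ (by simp [hsl]; simpa using hi), pv_strip_idem]
          · rw [ih]
            simp [hh, hm]
      · rw [show pvStepA (cs, h, m) l = (cs, h, m) from by
              have hl' := hlf; simp [pvIsHeader] at hl'
              have hi' : PySem.Str.startswith l "    " = false := by simpa using hi
              simp at hi'
              simp [pvStepA, hl', hi']]
        rw [ih]
        by_cases hh : h = ""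
        · simp [hh]
        · by_cases hm : m = "" <;>
            simp [hh, hm, pvBlockMsg_cons_skip l _ (by rw [show PySem.Str.startswith l "    " = false from by simpa using hi]; simp)]

theorem pv_commits_eq (lines : List String) :
    (let st := lines.foldl pvStepA ([], "", "");
     if st.2.1 ≠ "" then
       st.1 ++ [PySem.Str.slice st.2.1 none (some 7) ++ " " ++ PySem.Str.strip st.2.2]
     else st.1)
    = (pvBlocks lines).filterMap pvBlockCommit := by
  simpa using pv_main lines [] "" ""

-- ===== VERDICT (by name: the statement is the Claim_ definition above) =====
theorem filter_log_py_spec : Claim_equal_filter_log_py := by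
  intro output _
  unfold Spec_filter_log_py filter_log_py filter_log_py_alt
  by_cases h : PySem.Str.strip output = ""
  · simp [h]
  · simp only [h, if_false]
    rw [pv_commits_eq]
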